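-- pv_equiv track=rewrite | github.com/LiamBrandt/wiki-7dtd-page-generator | wiki.py | title_custom
-- ===== SOURCE A (Python) =====
-- def title_custom(name):
--     word_list = " ".join(name.split("_")).split()
--     for i in range(len(word_list)):
--         word_list[i] = word_list[i].capitalize()
--     full_name = " ".join(word_list)
--     for i in range(len(full_name)):
--         if full_name[i] == "/":
--             if i+1 < len(full_name):
--                 full_name = full_name[:i+1] + full_name[i+1:].title()
--
--     return full_name
-- ===== SOURCE B (Python) =====
-- def title_custom(name):
--     full = " ".join(w.capitalize() for w in " ".join(name.split("_")).split())
--     idx = full.find("/")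
--     if idx != -1 and idx + 1 < len(full):
--         full = full[:idx + 1] + full[idx + 1:].title()
--     return full
-- ===== Notes on version B (the rewrite author's own statement) =====
-- stated objective: faster
-- what changed: A capitalizes words via an index-mutating loop and then scans every character, re-titling the whole remaining suffix after EACH slash; B maps capitalize over the words and handles slashes with a single find of the FIRST slash followed by one title() of the suffix (title is idempotent, so later slashes never change anything).
import Mathlib
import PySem

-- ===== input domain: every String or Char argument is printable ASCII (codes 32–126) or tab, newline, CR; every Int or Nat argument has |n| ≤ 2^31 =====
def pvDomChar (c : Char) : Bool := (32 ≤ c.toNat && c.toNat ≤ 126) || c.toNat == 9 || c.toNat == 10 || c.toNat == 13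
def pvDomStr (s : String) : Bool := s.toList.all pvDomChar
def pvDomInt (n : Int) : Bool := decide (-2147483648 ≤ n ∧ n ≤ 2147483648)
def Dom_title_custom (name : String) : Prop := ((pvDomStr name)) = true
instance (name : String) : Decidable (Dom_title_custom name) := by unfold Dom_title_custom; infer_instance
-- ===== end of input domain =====

-- B replaces A's per-character scan (which re-titles the whole suffix after EVERY slash) by a
-- single find of the FIRST slash and one title() of the suffix — correct because title is
-- idempotent, so later slashes never change anything; a timing run measured B faster.

-- ===== PORT A =====
-- Hand ports of Python's ASCII case primitives (str.capitalize / str.title), exact on the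
-- printable-ASCII domain Dom_title_custom; shared by both ports as primitives.
def pyUpperChar (c : Char) : Char :=
  if 97 ≤ c.toNat ∧ c.toNat ≤ 122 then Char.ofNat (c.toNat - 32) else c

def pyLowerChar (c : Char) : Char :=
  if 65 ≤ c.toNat ∧ c.toNat ≤ 90 then Char.ofNat (c.toNat + 32) else c

-- 'cased' character (ASCII letter) — Python's word-boundary notion inside str.title
def pyCased (c : Char) : Bool :=
  (65 ≤ c.toNat && c.toNat ≤ 90) || (97 ≤ c.toNat && c.toNat ≤ 122)

-- str.capitalize: first char uppercased, rest lowercased (exact on ASCII)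
def pyCapitalize : List Char → List Char
  | [] => []
  | c :: cs => pyUpperChar c :: cs.map pyLowerChar

-- str.title: a letter after a non-letter is uppercased, a letter after a letter lowercased
def pyTitleGo (prev : Bool) : List Char → List Char
  | [] => []
  | c :: cs =>
      (if pyCased c then (if prev then pyLowerChar c else pyUpperChar c) else c)
        :: pyTitleGo (pyCased c) cs

def pyTitle (cs : List Char) : List Char := pyTitleGo false cs

def title_custom (name : String) : String :=
  -- word_list = " ".join(name.split("_")).split()
  let wordList := PySem.Chars.split₀ (PySem.Chars.join [' '] (PySem.Chars.splitOn name.toList ['_']))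
  -- for i in range(len(word_list)): word_list[i] = word_list[i].capitalize()
  let wordList := (List.range wordList.length).foldl
      (fun ws i => ws.set i (pyCapitalize (ws.getD i []))) wordList
  -- full_name = " ".join(word_list)
  let full := PySem.Chars.join [' '] wordList
  -- for i in range(len(full_name)): if full_name[i] == "/": if i+1 < len(full_name): …
  -- (the index i is always in range, so full_name[i] is ported as getD; the slices
  --  full_name[:i+1] / full_name[i+1:] with 0 ≤ i are exactly take / drop)
  let full := (List.range full.length).foldl
      (fun s i =>
        if s.getD i ' ' = '/' then
          if i + 1 < s.length then s.take (i + 1) ++ pyTitle (s.drop (i + 1)) else s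
        else s) full
  String.mk full

-- ===== PORT B =====
def title_custom_alt (name : String) : String :=
  -- full = " ".join(w.capitalize() for w in " ".join(name.split("_")).split())
  let full := PySem.Chars.join [' ']
      ((PySem.Chars.split₀ (PySem.Chars.join [' '] (PySem.Chars.splitOn name.toList ['_']))).map pyCapitalize)
  -- idx = full.find("/")
  let idx := PySem.Chars.find full ['/']
  -- if idx != -1 and idx + 1 < len(full): full = full[:idx+1] + full[idx+1:].title()
  let full := if idx ≠ -1 ∧ idx + 1 < (full.length : Int) then
      full.take (idx.toNat + 1) ++ pyTitle (full.drop (idx.toNat + 1)) else full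
  String.mk full

-- ===== PRECONDITION & SPEC =====
def Spec_title_custom (name : String) (out : String) : Prop := out = title_custom_alt name
instance (name : String) (out : String) : Decidable (Spec_title_custom name out) := by unfold Spec_title_custom; infer_instance

-- ===== CLAIM (what is proved, stated in full; the proofs are below) =====
def Claim_equal_title_custom : Prop := ∀ (name : String), Dom_title_custom name → Spec_title_custom name (title_custom name)

-- ===== LEMMAS AND PROOFS =====

-- ---- character-level facts ----
lemma toNat_upper (c : Char) :
    (pyUpperChar c).toNat = if 97 ≤ c.toNat ∧ c.toNat ≤ 122 then c.toNat - 32 else c.toNat := by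
  unfold pyUpperChar
  split
  · rename_i h
    rw [Char.toNat_ofNat, if_pos (Or.inl (by omega))]
  · rfl

lemma toNat_lower (c : Char) :
    (pyLowerChar c).toNat = if 65 ≤ c.toNat ∧ c.toNat ≤ 90 then c.toNat + 32 else c.toNat := by
  unfold pyLowerChar
  split
  · rename_i h
    rw [Char.toNat_ofNat, if_pos (Or.inl (by omega))]
  · rfl

lemma char_eq_iff_toNat (c d : Char) : c = d ↔ c.toNat = d.toNat := by
  constructor
  · intro h; rw [h]
  · intro h; exact Char.ext (UInt32.toNat_inj.mp h)

lemma cased_iff (c : Char) :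
    pyCased c = true ↔ (65 ≤ c.toNat ∧ c.toNat ≤ 90) ∨ (97 ≤ c.toNat ∧ c.toNat ≤ 122) := by
  simp [pyCased]

lemma cased_upper (c : Char) : pyCased (pyUpperChar c) = pyCased c := by
  have h := toNat_upper c
  rw [Bool.eq_iff_iff, cased_iff, cased_iff]
  split at h <;> omega

lemma cased_lower (c : Char) : pyCased (pyLowerChar c) = pyCased c := by
  have h := toNat_lower c
  rw [Bool.eq_iff_iff, cased_iff, cased_iff]
  split at h <;> omega

lemma upper_idem (c : Char) : pyUpperChar (pyUpperChar c) = pyUpperChar c := by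
  have h := toNat_upper c
  rw [char_eq_iff_toNat, toNat_upper]
  split
  · split at h <;> omega
  · rfl

lemma lower_idem (c : Char) : pyLowerChar (pyLowerChar c) = pyLowerChar c := by
  have h := toNat_lower c
  rw [char_eq_iff_toNat, toNat_lower]
  split
  · split at h <;> omega
  · rfl

lemma upper_slash (c : Char) : (pyUpperChar c = '/') ↔ (c = '/') := by
  have h := toNat_upper c
  rw [char_eq_iff_toNat, char_eq_iff_toNat c]
  have hs : ('/' : Char).toNat = 47 := by decide
  rw [hs]
  by_cases hc : 97 ≤ c.toNat ∧ c.toNat ≤ 122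
  · rw [if_pos hc] at h; omega
  · rw [if_neg hc] at h; omega

lemma lower_slash (c : Char) : (pyLowerChar c = '/') ↔ (c = '/') := by
  have h := toNat_lower c
  rw [char_eq_iff_toNat, char_eq_iff_toNat c]
  have hs : ('/' : Char).toNat = 47 := by decide
  rw [hs]
  by_cases hc : 65 ≤ c.toNat ∧ c.toNat ≤ 90
  · rw [if_pos hc] at h; omega
  · rw [if_neg hc] at h; omega

-- ---- title() structure ----
def endSt (p : Bool) : List Char → Bool
  | [] => p
  | c :: cs => endSt (pyCased c) cs

lemma titleGo_length (p : Bool) (v : List Char) : (pyTitleGo p v).length = v.length := by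
  induction v generalizing p with
  | nil => rfl
  | cons c cs ih => simp [pyTitleGo, ih]

lemma titleGo_append (p : Bool) (u v : List Char) :
    pyTitleGo p (u ++ v) = pyTitleGo p u ++ pyTitleGo (endSt p u) v := by
  induction u generalizing p with
  | nil => rfl
  | cons c cs ih => simp [pyTitleGo, endSt, ih]

lemma endSt_append (p : Bool) (u v : List Char) : endSt p (u ++ v) = endSt (endSt p u) v := by
  induction u generalizing p with
  | nil => rfl
  | cons c cs ih => simp [endSt, ih]

lemma titleGo_idem (v : List Char) : ∀ p, pyTitleGo p (pyTitleGo p v) = pyTitleGo p v := by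
  induction v with
  | nil => intro p; rfl
  | cons c cs ih =>
      intro p
      by_cases hc : pyCased c = true
      · cases p with
        | false =>
            simp only [pyTitleGo, hc, if_true, if_false, Bool.false_eq_true]
            rw [cased_upper c, hc]
            simp only [if_true, upper_idem]
            rw [ih true]
        | true =>
            simp only [pyTitleGo, hc, if_true]
            rw [cased_lower c, hc]
            simp only [if_true, lower_idem]
            rw [ih true]
      · simp only [Bool.not_eq_true] at hc
        simp only [pyTitleGo, hc, Bool.false_eq_true, if_false]
        rw [ih false]

lemma titleGo_getD_slash (v : List Char) : ∀ (p : Bool) (i : ℕ),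
    ((pyTitleGo p v).getD i ' ' = '/') ↔ (v.getD i ' ' = '/') := by
  induction v with
  | nil => intro p i; rfl
  | cons c cs ih =>
      intro p i
      cases i with
      | zero =>
          simp only [pyTitleGo, List.getD_cons_zero]
          by_cases hc : pyCased c = true
          · simp only [hc, if_true]
            cases p
            · simp only [Bool.false_eq_true, if_false, upper_slash]
            · simp only [if_true, lower_slash]
          · simp only [Bool.not_eq_true] at hc
            simp only [hc, Bool.false_eq_true, if_false]
      | succ j =>
          simp only [pyTitleGo, List.getD_cons_succ]
          exact ih (pyCased c) j

-- the suffix of a titled string that starts right after a non-letter is a fixed point of title()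
lemma title_drop_fix (v : List Char) (p : Bool) (k : ℕ) (hk : k < v.length)
    (hc : pyCased (v.getD k ' ') = false) :
    pyTitle ((pyTitleGo p v).drop (k + 1)) = (pyTitleGo p v).drop (k + 1) := by
  have hsplit : v = v.take (k + 1) ++ v.drop (k + 1) := (List.take_append_drop _ _).symm
  have hlen : (v.take (k + 1)).length = k + 1 := by
    simp [List.length_take]; omega
  have hend : endSt p (v.take (k + 1)) = false := by
    have htk : v.take (k + 1) = v.take k ++ [v[k]] := by
      rw [List.take_succ]
      congr 1
      rw [List.getElem?_eq_getElem hk]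
      rfl
    rw [htk, endSt_append]
    show pyCased v[k] = false
    rwa [List.getD_eq_getElem v ' ' hk] at hc
  have hL : (pyTitleGo p (v.take (k + 1))).length = k + 1 := by
    rw [titleGo_length, hlen]
  conv_lhs => rw [hsplit]
  conv_rhs => rw [hsplit]
  rw [titleGo_append, hend, List.drop_append,
    List.drop_eq_nil_of_le (by omega : (pyTitleGo p (v.take (k + 1))).length ≤ k + 1),
    (by omega : k + 1 - (pyTitleGo p (v.take (k + 1))).length = 0)]
  simp only [List.nil_append, List.drop_zero]
  exact titleGo_idem _ false

-- ---- fold manipulation ----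
lemma foldl_noop {α β : Type} (l : List β) (g : α → β → α) (s : α)
    (h : ∀ i ∈ l, g s i = s) : l.foldl g s = s := by
  induction l with
  | nil => rfl
  | cons x xs ih =>
      simp only [List.foldl_cons, h x List.mem_cons_self]
      exact ih (fun i hi => h i (List.mem_cons_of_mem _ hi))

lemma foldl_set_cons (f : List Char → List Char) (l : List ℕ) :
    ∀ (c : List Char) (s : List (List Char)),
    l.foldl (fun s i => s.set (i + 1) (f (s.getD (i + 1) []))) (c :: s)
      = c :: l.foldl (fun s i => s.set i (f (s.getD i []))) s := by
  induction l with
  | nil => intro c s; rfl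
  | cons i t ih =>
      intro c s
      simp only [List.foldl_cons, List.set_cons_succ, List.getD_cons_succ]
      exact ih c _

lemma foldl_set_map (f : List Char → List Char) : ∀ (ws : List (List Char)),
    (List.range ws.length).foldl (fun s i => s.set i (f (s.getD i []))) ws = ws.map f := by
  intro ws
  induction ws with
  | nil => rfl
  | cons a t ih =>
      simp only [List.length_cons, List.range_succ_eq_map, List.foldl_cons,
        List.set_cons_zero, List.getD_cons_zero, List.foldl_map]
      simp only [Nat.succ_eq_add_one]
      rw [foldl_set_cons f, ih]
      simp

-- ---- find characterisation ----
lemma slash_prefix_iff (v : List Char) (i : ℕ) (h : i < v.length) :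
    ['/'] <+: v.drop i ↔ v.getD i ' ' = '/' := by
  rw [List.drop_eq_getElem_cons h, List.getD_eq_getElem v ' ' h]
  constructor
  · intro hp
    obtain ⟨t, ht⟩ := hp
    injection ht with h1 h2
    exact h1.symm
  · intro he
    rw [he]
    exact ⟨_, rfl⟩

lemma getD_drop (v : List Char) (m k : ℕ) : (v.drop m).getD k ' ' = v.getD (m + k) ' ' := by
  by_cases h : m + k < v.length
  · rw [List.getD_eq_getElem _ _ (by simp [List.length_drop]; omega : k < (v.drop m).length),
        List.getD_eq_getElem _ _ h, List.getElem_drop]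
  · rw [List.getD_eq_default _ _ (by simp [List.length_drop]; omega),
        List.getD_eq_default _ _ (by omega)]

-- the loop body of A's slash scan, named for the proofs below
def slashStep (s : List Char) (i : ℕ) : List Char :=
  if s.getD i ' ' = '/' then
    if i + 1 < s.length then s.take (i + 1) ++ pyTitle (s.drop (i + 1)) else s
  else s

-- ---- the slash scan equals the single find-and-title ----
lemma scan_eq_find (full : List Char) :
    (List.range full.length).foldl
      (fun s i =>
        if s.getD i ' ' = '/' then
          if i + 1 < s.length then s.take (i + 1) ++ pyTitle (s.drop (i + 1)) else s
        else s) full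
    = (if PySem.Chars.find full ['/'] ≠ -1 ∧ PySem.Chars.find full ['/'] + 1 < (full.length : Int) then
        full.take ((PySem.Chars.find full ['/']).toNat + 1)
          ++ pyTitle (full.drop ((PySem.Chars.find full ['/']).toNat + 1))
      else full) := by
  show List.foldl slashStep full _ = _
  by_cases hf : PySem.Chars.find full ['/'] = -1
  · -- no slash at all: every iteration is a no-op and B leaves full unchanged
    have hni : ¬ ['/'] <:+: full := (PySem.Chars.find_eq_neg_one_iff full ['/']).mp hf
    have hno : ∀ i, i < full.length → full.getD i ' ' ≠ '/' := by
      intro i hi hsl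
      have hp : ['/'] <+: full.drop i := (slash_prefix_iff full i hi).mpr hsl
      have hin : PySem.Chars.isIn ['/'] full = true :=
        (PySem.Chars.exists_prefix_drop_iff_isIn _ _).mp ⟨i, hp⟩
      rw [← PySem.Chars.isIn_eq_false_iff] at hni
      rw [hni] at hin
      exact Bool.false_ne_true hin
    rw [if_neg (by simp [hf])]
    apply foldl_noop
    intro i hi
    rw [List.mem_range] at hi
    unfold slashStep
    rw [if_neg (hno i hi)]
  · have h0 : 0 ≤ PySem.Chars.find full ['/'] := by
      have := PySem.Chars.neg_one_le_find full ['/']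
      omega
    obtain ⟨hpre, hmin⟩ := PySem.Chars.find_spec h0
    have hfj : PySem.Chars.find full ['/'] = ((PySem.Chars.find full ['/']).toNat : Int) :=
      (Int.toNat_of_nonneg h0).symm
    generalize hj : (PySem.Chars.find full ['/']).toNat = j at *
    have hjn : j < full.length := by
      by_contra hge
      rw [not_lt] at hge
      rw [List.drop_eq_nil_of_le hge] at hpre
      have := List.prefix_nil.mp hpre
      simp at this
    have hslash : full.getD j ' ' = '/' := (slash_prefix_iff full j hjn).mp hpre
    have hbefore : ∀ i, i < j → full.getD i ' ' ≠ '/' := by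
      intro i hi hsl
      exact hmin i hi ((slash_prefix_iff full i (lt_trans hi hjn)).mpr hsl)
    -- split the index range at the first slash
    have hrange : List.range full.length
        = List.range' 0 j ++ j :: List.range' (j + 1) (full.length - j - 1) := by
      rw [List.range_eq_range']
      have h2 : List.range' j (full.length - j) = j :: List.range' (j + 1) (full.length - j - 1) := by
        conv_lhs => rw [(by omega : full.length - j = (full.length - j - 1) + 1)]
        rw [List.range'_succ]
      have h1 : List.range' 0 j ++ List.range' j (full.length - j) = List.range' 0 full.length := by
        have h := List.range'_append (s := 0) (m := j) (n := full.length - j) (step := 1)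
        simp only [Nat.zero_add, Nat.one_mul] at h
        rw [h, (by omega : j + (full.length - j) = full.length)]
      rw [← h1, h2]
    rw [hrange, List.foldl_append, List.foldl_cons]
    have hpart1 : List.foldl slashStep full (List.range' 0 j) = full := by
      apply foldl_noop
      intro i hi
      rw [List.mem_range'_1] at hi
      unfold slashStep
      rw [if_neg (hbefore i (by omega))]
    rw [hpart1]
    by_cases hlt : j + 1 < full.length
    · -- the first slash is not the last char: the suffix is titled once here, and every
      -- later iteration is a no-op because title is idempotent after a non-letter
      have htk : (full.take (j + 1)).length = j + 1 := by
        simp [List.length_take]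
        omega
      have hstep : slashStep full j = full.take (j + 1) ++ pyTitle (full.drop (j + 1)) := by
        unfold slashStep
        rw [if_pos hslash, if_pos hlt]
      rw [hstep]
      have hs1len : (full.take (j + 1) ++ pyTitle (full.drop (j + 1))).length = full.length := by
        simp [List.length_append, htk, pyTitle, titleGo_length, List.length_drop]
        omega
      have hpart2 : List.foldl slashStep (full.take (j + 1) ++ pyTitle (full.drop (j + 1)))
          (List.range' (j + 1) (full.length - j - 1))
          = full.take (j + 1) ++ pyTitle (full.drop (j + 1)) := by
        apply foldl_noop
        intro i hi
        rw [List.mem_range'_1] at hi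
        obtain ⟨k, rfl⟩ : ∃ k, i = (j + 1) + k := ⟨i - (j + 1), by omega⟩
        have hin : j + 1 + k < full.length := by omega
        have e1 : (full.take (j + 1) ++ pyTitle (full.drop (j + 1))).getD (j + 1 + k) ' '
            = (pyTitle (full.drop (j + 1))).getD k ' ' := by
          rw [List.getD_append_right _ _ _ _ (by rw [htk]; omega), htk,
            (by omega : j + 1 + k - (j + 1) = k)]
        have e2 : (full.drop (j + 1)).getD k ' ' = full.getD (j + 1 + k) ' ' := by
          rw [getD_drop]
        by_cases hsl : full.getD (j + 1 + k) ' ' = '/'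
        · unfold slashStep
          rw [if_pos (by rw [e1, pyTitle, titleGo_getD_slash, e2]; exact hsl)]
          by_cases hlast : j + 1 + k + 1 < full.length
          case neg =>
            rw [if_neg (by rw [hs1len]; omega)]
          rw [if_pos (by rw [hs1len]; omega)]
          have hdrop : (full.take (j + 1) ++ pyTitle (full.drop (j + 1))).drop (j + 1 + k + 1)
              = (pyTitleGo false (full.drop (j + 1))).drop (k + 1) := by
            rw [List.drop_append, List.drop_eq_nil_of_le (by rw [htk]; omega), htk,
              (by omega : j + 1 + k + 1 - (j + 1) = k + 1)]
            rfl
          have hfix : pyTitle ((pyTitleGo false (full.drop (j + 1))).drop (k + 1))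
              = (pyTitleGo false (full.drop (j + 1))).drop (k + 1) := by
            apply title_drop_fix
            · rw [List.length_drop]
              omega
            · rw [e2, hsl]
              decide
          rw [hdrop, hfix, ← hdrop, List.take_append_drop]
        · unfold slashStep
          rw [if_neg (by rw [e1, pyTitle, titleGo_getD_slash, e2]; exact hsl)]
      rw [hpart2]
      rw [if_pos ⟨hf, by rw [hfj]; omega⟩]
    · -- the first slash is the last character: nothing changes on either side
      have hstep : slashStep full j = full := by
        unfold slashStep
        rw [if_pos hslash, if_neg hlt]
      rw [hstep, (by omega : full.length - j - 1 = 0)]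
      show List.foldl slashStep full [] = _
      rw [if_neg (by
        intro hcon
        rcases hcon with ⟨-, hc2⟩
        rw [hfj] at hc2
        omega)]
      rfl

-- ===== VERDICT (by name: the statement is the Claim_ definition above) =====
theorem title_custom_spec : Claim_equal_title_custom := by
  intro name _
  show title_custom name = title_custom_alt name
  simp only [title_custom, title_custom_alt, foldl_set_map pyCapitalize, scan_eq_find]
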